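-- pv_equiv track=rewrite | github.com/1shaked/---- | heaps.py | heapUpdateKey
-- ===== SOURCE A (Python) =====
-- def getIndexParent(index: int) -> int:
--     nIndex = index / 2
--     if isinstance(nIndex, int):
--         return nIndex - 1
--     return int(nIndex - 0.5)
--
-- def swap(heap: list[int], firstIndex: int, secondIndex: int) -> None:
--     temp = heap[firstIndex]
--     heap[firstIndex] = heap[secondIndex]
--     heap[secondIndex] = temp
--
-- def getIndexLeftChild(index) -> int:
--     return index * 2 + 1
--
-- def getIndexRightChild(index) -> int:
--     return index * 2 + 2
--
-- def getLeftChildIndexSafe(heap: list[int], index: int) -> int: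
--     if getIndexLeftChild(index) >= len(heap):
--         return -1
--     return getIndexLeftChild(index)
--
-- def getRightChildIndexSafe(heap: list[int], index: int) -> int:
--     if getIndexRightChild(index) >= len(heap):
--         return -1
--     return getIndexRightChild(index)
--
-- def maxHeapDown(heap: list[int], index: int) -> list[int]:
--     '''
--     heap the list of int of your heap
--     index: the index of the element to start from
--     '''
--     while True:
--         parentIndex = index
--         leftChildIndex: int = getLeftChildIndexSafe(heap,parentIndex)
--         rightChildIndex: int = getRightChildIndexSafe(heap, parentIndex)
--
--         if leftChildIndex == rightChildIndex and rightChildIndex == -1: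
--             break
--         elif rightChildIndex == -1:
--             rightChildIndex = index
--         elif leftChildIndex == -1:
--             leftChildIndex = index
--
--         leftChild: int = heap[leftChildIndex]
--         rightChild: int = heap[rightChildIndex]
--         largestIndex = index
--         if leftChild > heap[largestIndex]:
--             largestIndex = leftChildIndex
--         if rightChild > heap[largestIndex]:
--             largestIndex = rightChildIndex
--         if largestIndex != index:
--             swap(heap, index, largestIndex)
--             index = largestIndex
--         else:
--             break
--     return heap
--
-- def heapUpdateKey(heap: list[int], index: int, value: int) -> list[int]:
--     if heap[index] > value:
--         heap[index] = value
--         heap = maxHeapDown(heap, index)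
--         return heap
--     elif heap[index] == value:
--         return heap
--
--     heap[index] = value
--     while heap[getIndexParent(index)] < heap[index]:
--         swap(heap, getIndexParent(index), index)
--         index = getIndexParent(index)
--
--     return heap
-- ===== SOURCE B (Python) =====
-- def maxHeapify(heap, i):
--     l, r = 2 * i + 1, 2 * i + 2
--     largest = i
--     if l < len(heap) and heap[l] > heap[largest]:
--         largest = l
--     if r < len(heap) and heap[r] > heap[largest]:
--         largest = r
--     if largest != i:
--         heap[i], heap[largest] = heap[largest], heap[i]
--         return maxHeapify(heap, largest)
--     return heap
--
-- def bubbleUp(heap, i):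
--     parent = (i - 1) // 2
--     if i > 0 and heap[parent] < heap[i]:
--         heap[parent], heap[i] = heap[i], heap[parent]
--         return bubbleUp(heap, parent)
--     return heap
--
-- def heapUpdateKey(heap: list[int], index: int, value: int) -> list[int]:
--     old = heap[index]
--     heap[index] = value
--     if value < old:
--         return maxHeapify(heap, index)
--     if value > old:
--         return bubbleUp(heap, index)
--     return heap
-- ===== Notes on version B (the rewrite author's own statement) =====
-- stated objective: simpler
-- what changed: Replaces A's sentinel-based (-1 child indices) iterative sift-down and its float-arithmetic parent formula with a standard recursive maxHeapify using plain bounds checks and a recursive bubbleUp keyed on (i-1)//2, with a single read-old-then-write top-level dispatch.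
-- outside the precondition, e.g. on heapUpdateKey([5, 4, 3, 2], -2, 9): A returns [5, 4, 2, 9], B returns [5, 4, 9, 2]
import Mathlib
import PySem

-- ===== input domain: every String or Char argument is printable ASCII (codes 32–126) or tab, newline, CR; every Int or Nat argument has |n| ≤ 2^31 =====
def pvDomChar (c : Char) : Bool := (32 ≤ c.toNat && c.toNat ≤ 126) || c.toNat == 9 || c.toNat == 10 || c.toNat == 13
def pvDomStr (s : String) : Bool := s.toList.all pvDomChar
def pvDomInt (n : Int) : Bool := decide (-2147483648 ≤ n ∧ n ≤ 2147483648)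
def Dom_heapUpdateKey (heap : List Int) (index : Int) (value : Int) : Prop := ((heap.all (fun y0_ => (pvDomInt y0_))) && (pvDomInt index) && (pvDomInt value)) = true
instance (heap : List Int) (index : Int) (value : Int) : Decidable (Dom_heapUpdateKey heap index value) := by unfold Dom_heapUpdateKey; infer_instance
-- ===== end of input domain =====

-- B replaces A's sentinel-based iterative sift-down and float parent formula with a standard
-- recursive maxHeapify/bubbleUp (objective: simpler). Both Pythons mutate `heap` in place the
-- same way; the equivalence proved here is about the returned list.

-- ===== PORT A =====
-- Under Pre_ the index is 0 ≤ index < len(heap), so every Python subscript A performs is in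
-- range; the ports therefore use Nat indices (`index.toNat`) and `getD` — exact on Pre_.
-- Both loops are given a fuel parameter purely to make the recursion structural (a totality
-- guard): A's sift-down index strictly increases and stays below the (constant) length, so
-- length+1 iterations can never be exhausted; A's bubble-up index strictly decreases, so
-- index+1 iterations can never be exhausted.

-- int(index/2 - 0.5) truncates (index-1)/2 toward zero; for index ≥ 0 (Nat) that is
-- (index-1)/2 with Nat subtraction (parent 0 = int(-0.5) = 0). Exact for |index| ≤ 2^31.
def getIndexParent (index : Nat) : Nat := (index - 1) / 2

def swapL (heap : List Int) (firstIndex secondIndex : Nat) : List Int :=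
  let temp := heap.getD firstIndex 0
  (heap.set firstIndex (heap.getD secondIndex 0)).set secondIndex temp

def getIndexLeftChild (index : Nat) : Int := (index : Int) * 2 + 1

def getIndexRightChild (index : Nat) : Int := (index : Int) * 2 + 2

def getLeftChildIndexSafe (heap : List Int) (index : Nat) : Int :=
  if getIndexLeftChild index ≥ (heap.length : Int) then -1 else getIndexLeftChild index

def getRightChildIndexSafe (heap : List Int) (index : Nat) : Int :=
  if getIndexRightChild index ≥ (heap.length : Int) then -1 else getIndexRightChild index

-- the loop body's selection of largestIndex (the -1 sentinels replaced by index, then the two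
-- strict comparisons), exactly as A computes it
def largestIdxA (heap : List Int) (index : Nat) : Nat :=
  let rightChildIndex := if getRightChildIndexSafe heap index = -1 then (index : Int) else getRightChildIndexSafe heap index
  let leftChildIndex := if getLeftChildIndexSafe heap index = -1 then (index : Int) else getLeftChildIndexSafe heap index
  let leftChild := heap.getD leftChildIndex.toNat 0
  let rightChild := heap.getD rightChildIndex.toNat 0
  let largestIndex := if leftChild > heap.getD index 0 then leftChildIndex.toNat else index
  if rightChild > heap.getD largestIndex 0 then rightChildIndex.toNat else largestIndex

def maxHeapDown : Nat → List Int → Nat → List Int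
  | 0, heap, _ => heap
  | fuel + 1, heap, index =>
    if getLeftChildIndexSafe heap index = getRightChildIndexSafe heap index ∧ getRightChildIndexSafe heap index = -1 then
      heap
    else if largestIdxA heap index ≠ index then
      maxHeapDown fuel (swapL heap index (largestIdxA heap index)) (largestIdxA heap index)
    else
      heap

def heapBubbleA : Nat → List Int → Nat → List Int
  | 0, heap, _ => heap
  | fuel + 1, heap, index =>
    if heap.getD (getIndexParent index) 0 < heap.getD index 0 then
      heapBubbleA fuel (swapL heap (getIndexParent index) index) (getIndexParent index)
    else
      heap

def heapUpdateKey (heap : List Int) (index : Int) (value : Int) : List Int :=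
  if heap.getD index.toNat 0 > value then
    maxHeapDown (heap.length + 1) (heap.set index.toNat value) index.toNat
  else if heap.getD index.toNat 0 = value then
    heap
  else
    heapBubbleA (index.toNat + 1) (heap.set index.toNat value) index.toNat

-- ===== PORT B =====
-- same fuel guards; B's maxHeapify recursion depth and bubbleUp recursion depth obey the same
-- bounds as A's loops

-- simultaneous assignment heap[i], heap[j] = heap[j], heap[i]
def heapSwap (heap : List Int) (i j : Nat) : List Int :=
  (heap.set i (heap.getD j 0)).set j (heap.getD i 0)

def bLargest (heap : List Int) (i : Nat) : Nat :=
  let l := 2 * i + 1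
  let r := 2 * i + 2
  let largest := if l < heap.length ∧ heap.getD l 0 > heap.getD i 0 then l else i
  if r < heap.length ∧ heap.getD r 0 > heap.getD largest 0 then r else largest

def maxHeapify : Nat → List Int → Nat → List Int
  | 0, heap, _ => heap
  | fuel + 1, heap, i =>
    if bLargest heap i ≠ i then
      maxHeapify fuel (heapSwap heap i (bLargest heap i)) (bLargest heap i)
    else
      heap

def bubbleUp : Nat → List Int → Nat → List Int
  | 0, heap, _ => heap
  | fuel + 1, heap, i =>
    if 0 < i ∧ heap.getD ((i - 1) / 2) 0 < heap.getD i 0 then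
      bubbleUp fuel (heapSwap heap ((i - 1) / 2) i) ((i - 1) / 2)
    else
      heap

def heapUpdateKey_alt (heap : List Int) (index : Int) (value : Int) : List Int :=
  let old := heap.getD index.toNat 0
  let heap2 := heap.set index.toNat value
  if value < old then
    maxHeapify (heap.length + 1) heap2 index.toNat
  else if old < value then
    bubbleUp (index.toNat + 1) heap2 index.toNat
  else
    heap2

-- ===== PRECONDITION & SPEC =====
-- Pre_ excludes out-of-range indices (A raises IndexError) and negative in-range indices:
-- heap positions are 0..len-1 and no specification covers a wrapped index, where A mixes
-- Python's wraparound element access with unwrapped parent/child arithmetic, a corner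
-- behaviour neither program's value is the intended one for.
def Pre_heapUpdateKey (heap : List Int) (index : Int) (value : Int) : Prop :=
  0 ≤ index ∧ index < heap.length

instance (heap : List Int) (index : Int) (value : Int) : Decidable (Pre_heapUpdateKey heap index value) := by
  unfold Pre_heapUpdateKey; infer_instance

def pvWitness_heapUpdateKey : List Int × Int × Int := ([5, 3, 4, 1], 2, 9)

def Spec_heapUpdateKey (heap : List Int) (index : Int) (value : Int) (out : List Int) : Prop := out = heapUpdateKey_alt heap index value
instance (heap : List Int) (index : Int) (value : Int) (out : List Int) : Decidable (Spec_heapUpdateKey heap index value out) := by unfold Spec_heapUpdateKey; infer_instance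

-- ===== CLAIM (what is proved, stated in full; the proofs are below) =====
def Claim_equal_heapUpdateKey : Prop := ∀ (heap : List Int) (index : Int) (value : Int), Dom_heapUpdateKey heap index value → Pre_heapUpdateKey heap index value → Spec_heapUpdateKey heap index value (heapUpdateKey heap index value)

-- ===== LEMMAS AND PROOFS =====

theorem bLargest_eq_largestIdxA (heap : List Int) (i : Nat) :
    bLargest heap i = largestIdxA heap i := by
  have el : ((i : Int) * 2 + 1).toNat = 2 * i + 1 := by omega
  have er : ((i : Int) * 2 + 2).toNat = 2 * i + 2 := by omega
  have ei : ((i : Int)).toNat = i := by omega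
  by_cases hl : 2 * i + 1 < heap.length <;> by_cases hr : 2 * i + 2 < heap.length <;>
    simp only [bLargest, largestIdxA, getLeftChildIndexSafe, getRightChildIndexSafe,
      getIndexLeftChild, getIndexRightChild,
      show ((i : Int) * 2 + 1 ≥ (heap.length : Int)) ↔ ¬(2 * i + 1 < heap.length) by omega,
      show ((i : Int) * 2 + 2 ≥ (heap.length : Int)) ↔ ¬(2 * i + 2 < heap.length) by omega,
      hl, hr, not_true, not_false_iff, if_true, if_false, true_and, false_and,
      show ¬((i : Int) * 2 + 1 = -1) by omega, show ¬((i : Int) * 2 + 2 = -1) by omega,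
      el, er, ei] <;>
    split_ifs <;> first | rfl | omega

theorem bLargest_of_break (heap : List Int) (i : Nat)
    (hbrk : getLeftChildIndexSafe heap i = getRightChildIndexSafe heap i ∧ getRightChildIndexSafe heap i = -1) :
    bLargest heap i = i := by
  simp only [getLeftChildIndexSafe, getRightChildIndexSafe, getIndexLeftChild,
    getIndexRightChild] at hbrk
  simp only [bLargest]
  split_ifs at hbrk ⊢ <;> omega

theorem heapSwap_eq_swapL (heap : List Int) (i j : Nat) : heapSwap heap i j = swapL heap i j := rfl

theorem maxHeapDown_eq_maxHeapify (fuel : Nat) (heap : List Int) (i : Nat) :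
    maxHeapDown fuel heap i = maxHeapify fuel heap i := by
  induction fuel generalizing heap i with
  | zero => rfl
  | succ fuel ih =>
    by_cases hbrk : getLeftChildIndexSafe heap i = getRightChildIndexSafe heap i ∧ getRightChildIndexSafe heap i = -1
    · simp [maxHeapDown, maxHeapify, hbrk, bLargest_of_break heap i hbrk]
    · by_cases h : largestIdxA heap i ≠ i
      · simp only [maxHeapDown, maxHeapify, if_neg hbrk, if_pos h,
          bLargest_eq_largestIdxA, heapSwap_eq_swapL]
        exact ih _ _
      · simp [maxHeapDown, maxHeapify, hbrk, h, bLargest_eq_largestIdxA]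

theorem heapBubbleA_eq_bubbleUp (fuel : Nat) (heap : List Int) (i : Nat) :
    heapBubbleA fuel heap i = bubbleUp fuel heap i := by
  induction fuel generalizing heap i with
  | zero => rfl
  | succ fuel ih =>
    by_cases h : heap.getD (getIndexParent i) 0 < heap.getD i 0
    · have hi : 0 < i := by
        rcases Nat.eq_zero_or_pos i with h0 | h0
        · subst h0; simp [getIndexParent] at h
        · exact h0
      simp only [heapBubbleA, bubbleUp, getIndexParent] at *
      rw [if_pos h, if_pos ⟨hi, h⟩, heapSwap_eq_swapL]
      exact ih _ _
    · simp only [heapBubbleA, bubbleUp, getIndexParent] at *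
      rw [if_neg h, if_neg (fun hc => h hc.2)]

theorem set_getD_self (l : List Int) (i : Nat) (h : i < l.length) :
    l.set i (l.getD i 0) = l := by
  rw [List.getD_eq_getElem l 0 h]
  exact List.set_getElem_self h

-- ===== VERDICT (by name: the statement is the Claim_ definition above) =====
theorem heapUpdateKey_spec : Claim_equal_heapUpdateKey := by
  intro heap index value _ hpre
  obtain ⟨h0, hlen⟩ := hpre
  unfold Spec_heapUpdateKey heapUpdateKey heapUpdateKey_alt
  have hi : index.toNat < heap.length := by omega
  rcases lt_trichotomy value (heap.getD index.toNat 0) with hv | hv | hv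
  · rw [if_pos hv, if_pos hv]
    exact maxHeapDown_eq_maxHeapify _ _ _
  · rw [if_neg (by omega), if_pos hv.symm, if_neg (by omega), if_neg (by omega)]
    rw [hv, set_getD_self heap index.toNat hi]
  · rw [if_neg (by omega), if_neg (by omega), if_neg (by omega), if_pos hv]
    exact heapBubbleA_eq_bubbleUp _ _ _
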